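-- pv_equiv track=rewrite | github.com/LokeshCBGitHub/gpdm-healthcare-analytics | scripts/old_versions/semantic_sql_engine_pre_upgrade.py | _age_group_case
-- ===== SOURCE A (Python) =====
-- def _age_group_case(col_expr: str, interval: int = None) -> str:
--     """Static helper: CASE WHEN for age buckets from a birth date column.
--     If interval is specified (e.g., 5), generates 5-year buckets.
--     Otherwise uses default clinical age groups."""
--     age_calc = f"(julianday('now') - julianday({col_expr})) / 365.25"
--
--     if interval and interval > 0:
--         # Dynamic N-year buckets: 0-4, 5-9, 10-14, ... up to max_age+
--         cases = []
--         max_age = 100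
--         for start in range(0, max_age, interval):
--             end = start + interval
--             label = f"'{start}-{end - 1}'"
--             cases.append(f"WHEN {age_calc} < {end} THEN {label}")
--         cases.append(f"ELSE '{max_age}+'")
--         return f"CASE {' '.join(cases)} END"
--     else:
--         # Default clinical age groups
--         return (
--             f"CASE "
--             f"WHEN {age_calc} < 18 THEN '0-17' "
--             f"WHEN {age_calc} < 35 THEN '18-34' "
--             f"WHEN {age_calc} < 50 THEN '35-49' "
--             f"WHEN {age_calc} < 65 THEN '50-64' "
--             f"ELSE '65+' END"
--         )
-- ===== SOURCE B (Python) =====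
-- def _age_group_case(col_expr: str, interval: int = None) -> str:
--     """Data-driven builder: one shared pass over a (threshold, label) table."""
--     age_calc = f"(julianday('now') - julianday({col_expr})) / 365.25"
--     if interval and interval > 0:
--         pairs = [(s + interval, f"{s}-{s + interval - 1}") for s in range(0, 100, interval)]
--         else_label = "100+"
--     else:
--         pairs = [(18, "0-17"), (35, "18-34"), (50, "35-49"), (65, "50-64")]
--         else_label = "65+"
--     parts = [f"WHEN {age_calc} < {t} THEN '{lbl}'" for t, lbl in pairs]
--     parts.append(f"ELSE '{else_label}'")
--     return "CASE " + " ".join(parts) + " END"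
-- ===== Notes on version B (the rewrite author's own statement) =====
-- stated objective: alternative
-- what changed: Replaced A's two independent string-building branches (a foldl-append loop and a hand-written literal) by one shared data-driven pass: each branch only supplies a (threshold,label) table and an else-label, and a single comprehension + join renders the CASE expression.
import Mathlib
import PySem

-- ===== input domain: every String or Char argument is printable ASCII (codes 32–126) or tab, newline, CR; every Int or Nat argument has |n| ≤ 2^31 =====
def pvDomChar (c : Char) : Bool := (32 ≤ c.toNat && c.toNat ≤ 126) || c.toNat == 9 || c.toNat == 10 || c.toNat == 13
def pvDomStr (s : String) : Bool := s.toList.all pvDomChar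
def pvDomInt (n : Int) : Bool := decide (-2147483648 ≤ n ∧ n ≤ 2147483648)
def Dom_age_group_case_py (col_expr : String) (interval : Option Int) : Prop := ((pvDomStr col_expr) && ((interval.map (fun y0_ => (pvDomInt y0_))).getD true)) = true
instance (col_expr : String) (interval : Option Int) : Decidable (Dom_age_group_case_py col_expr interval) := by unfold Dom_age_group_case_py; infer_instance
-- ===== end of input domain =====

-- B replaces A's two hand-written branches by one shared data-driven pass over a
-- (threshold, label) table (objective: alternative decomposition; not faster).
-- Strings are built over List Char (PySem.Chars) and packed with String.ofList, which is
-- exact for Python string concatenation.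

-- ===== PORT A =====
-- Literal transliteration of _age_group_case: the `interval and interval > 0` guard
-- (truthy and positive, i.e. `some iv` with 0 < iv), a foldl appending one WHEN
-- clause per range(0, 100, interval) start, then ELSE and join; else the fixed
-- clinical-groups string.
def age_group_case_py (col_expr : String) (interval : Option Int) : String :=
  let age_calc : List Char :=
    "(julianday('now') - julianday(".toList ++ col_expr.toList ++ ")) / 365.25".toList
  let defaultCase : String := String.ofList
    ("CASE WHEN ".toList ++ age_calc ++ " < 18 THEN '0-17' WHEN ".toList ++ age_calc ++
     " < 35 THEN '18-34' WHEN ".toList ++ age_calc ++ " < 50 THEN '35-49' WHEN ".toList ++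
     age_calc ++ " < 65 THEN '50-64' ELSE '65+' END".toList)
  match interval with
  | some iv =>
    if 0 < iv then
      let cases : List (List Char) :=
        (PySem.List.pyRange 0 100 iv).foldl (fun acc start =>
          let e := start + iv
          let label := "'".toList ++ (PySem.Int.toStr start).toList ++ "-".toList ++
                       (PySem.Int.toStr (e - 1)).toList ++ "'".toList
          acc ++ ["WHEN ".toList ++ age_calc ++ " < ".toList ++
                  (PySem.Int.toStr e).toList ++ " THEN ".toList ++ label]) []
      let cases := cases ++ ["ELSE '100+'".toList]
      String.ofList ("CASE ".toList ++ PySem.Chars.join " ".toList cases ++ " END".toList)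
    else defaultCase
  | none => defaultCase

-- ===== PORT B =====
-- Transliteration of Source B: build a (threshold, label) table (computed from the range
-- for the interval branch, a literal table for the default branch) plus an else-label,
-- then one shared pass renders WHEN clauses, appends the ELSE and joins.
def age_group_case_py_alt (col_expr : String) (interval : Option Int) : String :=
  let age_calc : List Char :=
    "(julianday('now') - julianday(".toList ++ col_expr.toList ++ ")) / 365.25".toList
  let tbl : List (Int × List Char) × List Char :=
    if 0 < interval.getD 0 then
      let iv := interval.getD 0
      ((PySem.List.pyRange 0 100 iv).map (fun s =>
          (s + iv, (PySem.Int.toStr s).toList ++ "-".toList ++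
                   (PySem.Int.toStr (s + iv - 1)).toList)),
       "100+".toList)
    else
      ([(18, "0-17".toList), (35, "18-34".toList), (50, "35-49".toList),
        (65, "50-64".toList)], "65+".toList)
  let parts : List (List Char) := tbl.1.map (fun p =>
    "WHEN ".toList ++ age_calc ++ " < ".toList ++ (PySem.Int.toStr p.1).toList ++
    " THEN '".toList ++ p.2 ++ "'".toList)
  let parts := parts ++ ["ELSE '".toList ++ tbl.2 ++ "'".toList]
  String.ofList ("CASE ".toList ++ PySem.Chars.join " ".toList parts ++ " END".toList)

-- ===== PRECONDITION & SPEC =====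
def Spec_age_group_case_py (col_expr : String) (interval : Option Int) (out : String) : Prop := out = age_group_case_py_alt col_expr interval
instance (col_expr : String) (interval : Option Int) (out : String) : Decidable (Spec_age_group_case_py col_expr interval out) := by unfold Spec_age_group_case_py; infer_instance

-- ===== CLAIM (what is proved, stated in full; the proofs are below) =====
def Claim_equal_age_group_case_py : Prop := ∀ (col_expr : String) (interval : Option Int), Dom_age_group_case_py col_expr interval → Spec_age_group_case_py col_expr interval (age_group_case_py col_expr interval)

-- ===== LEMMAS AND PROOFS =====
set_option maxRecDepth 8000

-- A loop that only appends one element per iteration is the map of its body.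
theorem pvFoldlPush {α β : Type} (f : α → β) (l : List α) (init : List β) :
    l.foldl (fun acc x => acc ++ [f x]) init = init ++ l.map f := by
  induction l generalizing init with
  | nil => simp
  | cons x xs ih => simp [List.foldl, ih]

-- ===== VERDICT (by name: the statement is the Claim_ definition above) =====
theorem age_group_case_py_spec : Claim_equal_age_group_case_py := by
  intro col_expr interval _
  unfold Spec_age_group_case_py age_group_case_py age_group_case_py_alt
  match interval with
  | none =>
    simp [PySem.Chars.join_cons_cons, PySem.Chars.join_singleton, (show PySem.Int.toChars (18:Int) = ['1','8'] by decide), (show PySem.Int.toChars (35:Int) = ['3','5'] by decide), (show PySem.Int.toChars (50:Int) = ['5','0'] by decide), (show PySem.Int.toChars (65:Int) = ['6','5'] by decide)]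
  | some iv =>
    by_cases h : 0 < iv
    · simp only [h, if_pos, Option.getD_some]
      rw [pvFoldlPush (fun start =>
        "WHEN ".toList ++ ("(julianday('now') - julianday(".toList ++ col_expr.toList ++ ")) / 365.25".toList) ++ " < ".toList ++
        (PySem.Int.toStr (start + iv)).toList ++ " THEN ".toList ++
        ("'".toList ++ (PySem.Int.toStr start).toList ++ "-".toList ++
         (PySem.Int.toStr (start + iv - 1)).toList ++ "'".toList))]
      rw [List.map_map, List.nil_append]
      refine congrArg String.ofList ?_
      refine congrArg (fun z => 'C' :: 'A' :: 'S' :: 'E' :: ' ' ::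
        (PySem.Chars.join [' '] (z ++ [['E', 'L', 'S', 'E', ' ', '\'', '1', '0', '0', '+', '\'']]) ++
          [' ', 'E', 'N', 'D'])) ?_
      apply List.map_congr_left
      intro s _
      simp
    · simp [h, PySem.Chars.join_cons_cons, PySem.Chars.join_singleton, (show PySem.Int.toChars (18:Int) = ['1','8'] by decide), (show PySem.Int.toChars (35:Int) = ['3','5'] by decide), (show PySem.Int.toChars (50:Int) = ['5','0'] by decide), (show PySem.Int.toChars (65:Int) = ['6','5'] by decide)]
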